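-- pv_equiv track=rewrite | github.com/AtticusAlan/PIcPickGame | pic_pick_1p_hard.py | genTail2
-- ===== SOURCE A (Python) =====
-- def genTail2(head_row, head_column, dir):
--     tail2 = []
--     # generate tail2 grids based on different direction
--     # arrow pointing up:
--     if dir == 'up':
--         tail2.append((head_row + 2, head_column + 1))
--         tail2.append((head_row + 1, head_column + 2))
--         tail2.append((head_row + 2, head_column - 1))
--         tail2.append((head_row + 1, head_column - 2))
--         for j in range(1,5):
--             tail2.append((head_row + j, head_column))
--     # arrow pointing down:
--     elif dir == 'down':
--         tail2.append((head_row - 2, head_column + 1))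
--         tail2.append((head_row - 1, head_column + 2))
--         tail2.append((head_row - 2, head_column - 1))
--         tail2.append((head_row - 1, head_column - 2))
--         for j in range(1,5):
--             tail2.append((head_row - j, head_column))
--     elif dir == 'right':
--         tail2.append((head_row - 2, head_column - 1))
--         tail2.append((head_row - 1, head_column - 2))
--         tail2.append((head_row + 2, head_column - 1))
--         tail2.append((head_row + 1, head_column - 2))
--         for j in range(1,5):
--             tail2.append((head_row, head_column - j))
--     else: # left
--         tail2.append((head_row - 2, head_column + 1))
--         tail2.append((head_row - 1, head_column + 2))
--         tail2.append((head_row + 2, head_column + 1))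
--         tail2.append((head_row + 1, head_column + 2))
--         for j in range(1,5):
--             tail2.append((head_row, head_column + j))
--     return tail2
-- ===== SOURCE B (Python) =====
-- def genTail2(head_row, head_column, dir):
--     # Direction as a unit vector pointing along the tail; everything else is
--     # derived by vector arithmetic instead of per-direction constant lists.
--     vr, vc = {'up': (1, 0), 'down': (-1, 0), 'right': (0, -1)}.get(dir, (0, 1))
--     pr, pc = abs(vc), abs(vr)          # perpendicular unit vector
--     diag = [(2*vr + pr, 2*vc + pc), (vr + 2*pr, vc + 2*pc),
--             (2*vr - pr, 2*vc - pc), (vr - 2*pr, vc - 2*pc)]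
--     if vr == 0:                        # horizontal arrows list the fins in the opposite order
--         diag.reverse()
--     offsets = diag + [(j*vr, j*vc) for j in range(1, 5)]
--     return [(head_row + dr, head_column + dc) for dr, dc in offsets]
-- ===== Notes on version B (the rewrite author's own statement) =====
-- stated objective: alternative
-- what changed: Replaced the four hard-coded branch/append blocks with vector arithmetic: the direction is mapped to a unit vector, the four fin offsets are computed as linear combinations of it and its perpendicular (reversed for horizontal arrows), the shaft as scalar multiples, then one uniform translation pass.
import Mathlib
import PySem

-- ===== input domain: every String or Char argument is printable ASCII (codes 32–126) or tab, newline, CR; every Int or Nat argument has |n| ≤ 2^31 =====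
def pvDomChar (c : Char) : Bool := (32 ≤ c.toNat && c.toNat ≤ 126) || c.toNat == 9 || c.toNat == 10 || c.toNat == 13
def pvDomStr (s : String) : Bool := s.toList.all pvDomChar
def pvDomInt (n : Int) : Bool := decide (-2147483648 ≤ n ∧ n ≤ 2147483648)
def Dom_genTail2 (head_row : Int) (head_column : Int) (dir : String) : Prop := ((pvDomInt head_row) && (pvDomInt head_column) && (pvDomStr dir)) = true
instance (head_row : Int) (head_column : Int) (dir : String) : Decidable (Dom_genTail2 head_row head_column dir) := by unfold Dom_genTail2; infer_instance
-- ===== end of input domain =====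

-- ===== PORT A =====
-- B derives all offsets by vector arithmetic from a direction unit vector instead of four hard-coded branches (alternative; same cost).

def genTail2 (head_row : Int) (head_column : Int) (dir : String) : List (Int × Int) :=
  if dir == "up" then
    let tail2 : List (Int × Int) :=
      [(head_row + 2, head_column + 1), (head_row + 1, head_column + 2),
       (head_row + 2, head_column - 1), (head_row + 1, head_column - 2)]
    (PySem.List.pyRange 1 5 1).foldl (fun acc j => acc ++ [(head_row + j, head_column)]) tail2
  else if dir == "down" then
    let tail2 : List (Int × Int) :=
      [(head_row - 2, head_column + 1), (head_row - 1, head_column + 2),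
       (head_row - 2, head_column - 1), (head_row - 1, head_column - 2)]
    (PySem.List.pyRange 1 5 1).foldl (fun acc j => acc ++ [(head_row - j, head_column)]) tail2
  else if dir == "right" then
    let tail2 : List (Int × Int) :=
      [(head_row - 2, head_column - 1), (head_row - 1, head_column - 2),
       (head_row + 2, head_column - 1), (head_row + 1, head_column - 2)]
    (PySem.List.pyRange 1 5 1).foldl (fun acc j => acc ++ [(head_row, head_column - j)]) tail2
  else
    let tail2 : List (Int × Int) :=
      [(head_row - 2, head_column + 1), (head_row - 1, head_column + 2),
       (head_row + 2, head_column + 1), (head_row + 1, head_column + 2)]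
    (PySem.List.pyRange 1 5 1).foldl (fun acc j => acc ++ [(head_row, head_column + j)]) tail2

-- ===== PORT B =====
def pvDirVec : PySem.Dict String (Int × Int) :=
  ((PySem.Dict.empty
    |>.insert "up" ((1 : Int), (0 : Int)))
    |>.insert "down" ((-1 : Int), (0 : Int)))
    |>.insert "right" ((0 : Int), (-1 : Int))

def genTail2_alt (head_row : Int) (head_column : Int) (dir : String) : List (Int × Int) :=
  let v := pvDirVec.getD dir ((0 : Int), (1 : Int))
  let vr := v.1; let vc := v.2
  let pr := |vc|; let pc := |vr|
  let diag : List (Int × Int) :=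
    [(2*vr + pr, 2*vc + pc), (vr + 2*pr, vc + 2*pc),
     (2*vr - pr, 2*vc - pc), (vr - 2*pr, vc - 2*pc)]
  let diag := if vr = 0 then diag.reverse else diag
  let offsets := diag ++ (PySem.List.pyRange 1 5 1).map (fun j => (j*vr, j*vc))
  offsets.map (fun p => (head_row + p.1, head_column + p.2))

-- ===== PRECONDITION & SPEC =====
def Spec_genTail2 (head_row : Int) (head_column : Int) (dir : String) (out : List (Int × Int)) : Prop := out = genTail2_alt head_row head_column dir
instance (head_row : Int) (head_column : Int) (dir : String) (out : List (Int × Int)) : Decidable (Spec_genTail2 head_row head_column dir out) := by unfold Spec_genTail2; infer_instance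

-- ===== CLAIM =====
def Claim_equal_genTail2 : Prop := ∀ (head_row : Int) (head_column : Int) (dir : String), Dom_genTail2 head_row head_column dir → Spec_genTail2 head_row head_column dir (genTail2 head_row head_column dir)

-- ===== LEMMAS AND PROOFS =====

-- ===== VERDICT =====
theorem genTail2_spec : Claim_equal_genTail2 := by
  intro head_row head_column dir _
  unfold Spec_genTail2 genTail2 genTail2_alt pvDirVec
  by_cases h1 : dir = "up"
  · simp [h1, PySem.List.pyRange, List.range_succ, PySem.Dict.getD, PySem.Dict.get?,
      PySem.Dict.insert, PySem.Dict.empty]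
    omega
  · by_cases h2 : dir = "down"
    · simp [h2, PySem.List.pyRange, List.range_succ, PySem.Dict.getD, PySem.Dict.get?,
        PySem.Dict.insert, PySem.Dict.empty]
      omega
    · by_cases h3 : dir = "right"
      · simp [h3, PySem.List.pyRange, List.range_succ, PySem.Dict.getD, PySem.Dict.get?,
          PySem.Dict.insert, PySem.Dict.empty]
        omega
      · have e1 : ("up" == dir) = false := by simp [Ne.symm h1]
        have e2 : ("down" == dir) = false := by simp [Ne.symm h2]
        have e3 : ("right" == dir) = false := by simp [Ne.symm h3]
        simp [h1, h2, h3, List.find?, e1, e2, e3, PySem.List.pyRange, List.range_succ,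
          PySem.Dict.getD, PySem.Dict.get?, PySem.Dict.insert, PySem.Dict.empty]
        omega
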